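-- pv_equiv track=rewrite | github.com/fexutie/navigation | MultipleTasks/GLM.py | State_transform
-- ===== SOURCE A (Python) =====
-- def wall_detection(pos, size):
--     if pos[0] == 2:
--         Stim = 1
--     elif pos[0] == 2 + size - 1:
--         Stim = 2
--     elif pos[1] == 2:
--         Stim = 3
--     elif pos[1] == 2 + size - 1:
--         Stim = 4
--     else:
--         Stim = 0
--     return Stim
--
-- def State_transform(State, Poss, size):
-- #     S = [p[0]  for s, p in zip(State, Poss)]
--     S = [wall_detection(pos, size) for pos in Poss]
--     Status = []
--     s1 = 0
--     for s in S:
--         if s != 0: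
--             s1 = s
-- #         print (s1)
--         Status.append(s1)
--     return Status
-- ===== SOURCE B (Python) =====
-- def wall_detection(pos, size):
--     if pos[0] == 2:
--         Stim = 1
--     elif pos[0] == 2 + size - 1:
--         Stim = 2
--     elif pos[1] == 2:
--         Stim = 3
--     elif pos[1] == 2 + size - 1:
--         Stim = 4
--     else:
--         Stim = 0
--     return Stim
--
-- def State_transform(State, Poss, size):
--     # Run-length construction: collect the positions of nonzero wall codes,
--     # then emit the output as a concatenation of constant runs between marks.
--     codes = [wall_detection(pos, size) for pos in Poss]
--     marks = [(i, c) for i, c in enumerate(codes) if c != 0]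
--     out = []
--     prev_i, prev_c = 0, 0
--     for i, c in marks:
--         out.extend([prev_c] * (i - prev_i))
--         prev_i, prev_c = i, c
--     out.extend([prev_c] * (len(codes) - prev_i))
--     return out
-- ===== Notes on version B (the rewrite author's own statement) =====
-- stated objective: alternative
-- what changed: Instead of an element-wise carry loop, B builds the output by run-length construction: it collects the (index, code) marks where the wall code is nonzero and concatenates constant runs between consecutive marks.
import Mathlib
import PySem

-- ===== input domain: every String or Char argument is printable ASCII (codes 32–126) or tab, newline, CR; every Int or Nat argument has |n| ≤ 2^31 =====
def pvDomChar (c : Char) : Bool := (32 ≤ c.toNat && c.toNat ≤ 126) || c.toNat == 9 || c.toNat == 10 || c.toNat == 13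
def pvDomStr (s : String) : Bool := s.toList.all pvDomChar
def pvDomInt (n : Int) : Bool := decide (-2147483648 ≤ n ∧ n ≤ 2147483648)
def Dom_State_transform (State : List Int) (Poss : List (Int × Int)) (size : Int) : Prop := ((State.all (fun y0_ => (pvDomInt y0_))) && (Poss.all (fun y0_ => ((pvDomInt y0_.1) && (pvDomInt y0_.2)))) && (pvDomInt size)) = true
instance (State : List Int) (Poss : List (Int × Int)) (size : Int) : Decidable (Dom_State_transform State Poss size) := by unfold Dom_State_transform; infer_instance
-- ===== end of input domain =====

-- B replaces A's element-wise carry loop by a run-length construction over the nonzero marks; same O(n) cost, a different decomposition.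


-- ===== PORT A =====
def wall_detection (pos : Int × Int) (size : Int) : Int :=
  if pos.1 = 2 then 1
  else if pos.1 = 2 + size - 1 then 2
  else if pos.2 = 2 then 3
  else if pos.2 = 2 + size - 1 then 4
  else 0

def State_transform (State : List Int) (Poss : List (Int × Int)) (size : Int) : List Int :=
  let S := Poss.map (fun pos => wall_detection pos size)
  let r := S.foldl (fun (acc : Int × List Int) s =>
    let s1 := if s ≠ 0 then s else acc.1
    (s1, acc.2 ++ [s1])) (0, [])
  r.2

-- ===== PORT B =====
-- Python's enumerate, ported by hand (exact: pairs each element with its 0-based index)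
def enumFrom (n : Nat) : List Int → List (Nat × Int)
  | [] => []
  | x :: xs => (n, x) :: enumFrom (n + 1) xs

def State_transform_alt (State : List Int) (Poss : List (Int × Int)) (size : Int) : List Int :=
  let codes := Poss.map (fun pos => wall_detection pos size)
  let marks := (enumFrom 0 codes).filter (fun ic => ic.2 ≠ 0)
  let st := marks.foldl (fun (acc : Nat × Int × List Int) ic =>
      (ic.1, ic.2, acc.2.2 ++ List.replicate (ic.1 - acc.1) acc.2.1)) (0, 0, [])
  st.2.2 ++ List.replicate (codes.length - st.1) st.2.1

-- ===== PRECONDITION & SPEC =====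
def Spec_State_transform (State : List Int) (Poss : List (Int × Int)) (size : Int) (out : List Int) : Prop := out = State_transform_alt State Poss size
instance (State : List Int) (Poss : List (Int × Int)) (size : Int) (out : List Int) : Decidable (Spec_State_transform State Poss size out) := by unfold Spec_State_transform; infer_instance

-- ===== CLAIM (what is proved, stated in full; the proofs are below) =====
def Claim_equal_State_transform : Prop := ∀ (State : List Int) (Poss : List (Int × Int)) (size : Int), Dom_State_transform State Poss size → Spec_State_transform State Poss size (State_transform State Poss size)

-- ===== LEMMAS AND PROOFS =====

-- the carry-forward scan both programs compute
def carryGo (acc : Int) : List Int → List Int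
  | [] => []
  | s :: rest => let n := if s ≠ 0 then s else acc; n :: carryGo n rest

-- A's fold, generalized over the carried s1 and the accumulated output list
lemma foldA_eq (S : List Int) : ∀ (s1 : Int) (acc : List Int),
    (S.foldl (fun (acc : Int × List Int) s =>
      let s1 := if s ≠ 0 then s else acc.1
      (s1, acc.2 ++ [s1])) (s1, acc)).2 = acc ++ carryGo s1 S := by
  induction S with
  | nil => intro s1 acc; simp [carryGo]
  | cons s rest ih =>
    intro s1 acc
    simp only [List.foldl, carryGo]
    rw [ih]
    simp

-- B's segment build, generalized: state (pi, pc, out) with pi ≤ n0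
lemma foldB_eq (codes : List Int) : ∀ (n0 pi : Nat) (pc : Int) (out : List Int), pi ≤ n0 →
    (let st := ((enumFrom n0 codes).filter (fun ic => ic.2 ≠ 0)).foldl
        (fun (acc : Nat × Int × List Int) ic =>
          (ic.1, ic.2, acc.2.2 ++ List.replicate (ic.1 - acc.1) acc.2.1)) (pi, pc, out)
     st.2.2 ++ List.replicate (n0 + codes.length - st.1) st.2.1)
    = out ++ List.replicate (n0 - pi) pc ++ carryGo pc codes := by
  induction codes with
  | nil => intro n0 pi pc out h; simp [enumFrom, carryGo]
  | cons c rest ih =>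
    intro n0 pi pc out h
    simp only [enumFrom, List.filter]
    by_cases hc : c = 0
    · subst hc
      have := ih (n0 + 1) pi pc out (by omega)
      simp only [show decide ((0:Int) ≠ 0) = false by decide]
      simp only at this
      rw [show n0 + 1 + rest.length = n0 + ((0:Int) :: rest).length by simp; omega] at this
      rw [this]
      have hr : List.replicate (n0 + 1 - pi) pc
          = List.replicate (n0 - pi) pc ++ [pc] := by
        rw [show n0 + 1 - pi = (n0 - pi) + 1 by omega, List.replicate_succ']
      rw [hr]
      simp [carryGo]
    · simp only [show decide (c ≠ 0) = true by simp [hc], List.foldl]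
      have := ih (n0 + 1) n0 c (out ++ List.replicate (n0 - pi) pc) (by omega)
      simp only at this
      rw [show n0 + 1 + rest.length = n0 + (c :: rest).length by simp; omega] at this
      rw [this]
      simp [carryGo, hc]

-- ===== VERDICT (by name: the statement is the Claim_ definition above) =====
theorem State_transform_spec : Claim_equal_State_transform := by
  intro State Poss size _
  unfold Spec_State_transform State_transform State_transform_alt
  simp only [foldA_eq, List.nil_append]
  have := foldB_eq (Poss.map (fun pos => wall_detection pos size)) 0 0 0 [] (le_refl 0)
  simp only [Nat.zero_add, Nat.sub_zero, List.replicate_zero, List.nil_append] at this ⊢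
  rw [← this]
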